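-- pv_equiv track=rewrite | github.com/glinerosuarez/iquestions | algos/largest_elements_in_array.py | two_max_solution
-- ===== SOURCE A (Python) =====
-- from typing import List
--
-- def two_max_solution(a: List[int]) -> List[int]:
--     res = list()
--     n = len(a)
--
--     max_val = second_max_val = float("-inf")
--
--     for i in range(n):
--         if a[i] > max_val:
--             second_max_val = max_val
--             max_val = a[i]
--         elif second_max_val < a[i] < max_val:
--             second_max_val = a[i]
--
--     for e in a:
--         if e < second_max_val:
--             res.append(e)
--
--     return res
-- ===== SOURCE B (Python) =====
-- def two_max_solution(a):
--     if not a: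
--         return []
--     m = max(a)
--     s = max((x for x in a if x < m), default=float("-inf"))
--     return [x for x in a if x < s]
-- ===== Notes on version B (the rewrite author's own statement) =====
-- stated objective: simpler
-- what changed: Replaces A's hand-maintained two-variable tracking loop with two built-in max reductions (overall max, then max of the elements strictly below it) followed by a single filter.
import Mathlib
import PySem

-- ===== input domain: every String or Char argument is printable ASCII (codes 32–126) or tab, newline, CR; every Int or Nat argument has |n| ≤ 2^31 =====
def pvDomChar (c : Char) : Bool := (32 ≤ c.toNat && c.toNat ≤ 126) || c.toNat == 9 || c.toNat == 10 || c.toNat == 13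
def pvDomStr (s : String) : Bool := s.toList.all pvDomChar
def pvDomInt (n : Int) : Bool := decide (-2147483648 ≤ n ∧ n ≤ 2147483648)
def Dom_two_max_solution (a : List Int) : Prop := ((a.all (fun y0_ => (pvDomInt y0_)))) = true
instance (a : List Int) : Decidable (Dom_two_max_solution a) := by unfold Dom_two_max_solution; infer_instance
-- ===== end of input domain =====

-- B replaces A's hand-maintained two-variable tracking loop with two built-in max
-- reductions (overall max, then max of elements strictly below it) and one filter;
-- objective: simpler. Equal return values on all inputs.

-- ===== PORT A =====
-- float("-inf") is modelled as `none` in an Option Int (every Int exceeds it; nothing is below it).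
def twoMaxStep (st : Option Int × Option Int) (x : Int) : Option Int × Option Int :=
  if (match st.1 with | none => true | some m => decide (m < x)) then
    (some x, st.1)
  else if ((match st.2 with | none => true | some s => decide (s < x)) &&
           (match st.1 with | none => false | some m => decide (x < m))) then
    (st.1, some x)
  else st

def two_max_solution (a : List Int) : List Int :=
  let st := a.foldl twoMaxStep (none, none)
  a.foldl (fun res e =>
    if (match st.2 with | none => false | some s => decide (e < s)) then res ++ [e] else res) []

-- ===== PORT B =====
def two_max_solution_alt (a : List Int) : List Int :=
  if a = [] then []
  else
    match PySem.List.max? a (fun y => y) with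
    | none => []   -- unreachable: a ≠ []
    | some m =>
      let s := PySem.List.max? (a.filter (fun x => decide (x < m))) (fun y => y)
      a.filter (fun x => match s with | none => false | some sv => decide (x < sv))

-- ===== PRECONDITION & SPEC =====
def Spec_two_max_solution (a : List Int) (out : List Int) : Prop := out = two_max_solution_alt a
instance (a : List Int) (out : List Int) : Decidable (Spec_two_max_solution a out) := by unfold Spec_two_max_solution; infer_instance

-- ===== CLAIM (what is proved, stated in full; the proofs are below) =====
def Claim_equal_two_max_solution : Prop := ∀ (a : List Int), Dom_two_max_solution a → Spec_two_max_solution a (two_max_solution a)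

-- ===== LEMMAS AND PROOFS =====

-- running maximum of a list, none for []
def pmax : List Int → Option Int
  | [] => none
  | x :: t => some (t.foldl max x)

theorem pmax_append_single (l : List Int) (y : Int) :
    pmax (l ++ [y]) = match pmax l with | none => some y | some m => some (max m y) := by
  cases l with
  | nil => simp [pmax]
  | cons h t => simp [pmax, List.foldl_append]

theorem le_foldl_max (t : List Int) (a : Int) : a ≤ t.foldl max a := by
  induction t generalizing a with
  | nil => simp
  | cons h tl ih => exact le_trans (le_max_left a h) (ih (max a h))

theorem mem_le_foldl_max (t : List Int) (a x : Int) (hx : x ∈ t) : x ≤ t.foldl max a := by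
  induction t generalizing a with
  | nil => simp at hx
  | cons h tl ih =>
    rcases List.mem_cons.mp hx with rfl | hx
    · exact le_trans (le_max_right a x) (le_foldl_max tl (max a x))
    · exact ih (max a h) hx

theorem pmax_le {l : List Int} {m : Int} (h : pmax l = some m) : ∀ x ∈ l, x ≤ m := by
  cases l with
  | nil => simp [pmax] at h
  | cons a t =>
    simp only [pmax, Option.some.injEq] at h
    subst h
    intro x hx
    rcases List.mem_cons.mp hx with rfl | hx
    · exact le_foldl_max t x
    · exact mem_le_foldl_max t a x hx

theorem max?_eq_pmax (l : List Int) : PySem.List.max? l (fun y => y) = pmax l := by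
  cases l with
  | nil => simp [PySem.List.max?, pmax]
  | cons h t => simpa [pmax] using PySem.List.max?_id_cons h t

-- the loop invariant: A's fold computes (max, second-distinct-max) in Option form
theorem foldl_step_char (l : List Int) :
    l.foldl twoMaxStep (none, none) =
      match pmax l with
      | none => (none, none)
      | some m => (some m, pmax (l.filter (fun x => decide (x < m)))) := by
  induction l using List.reverseRecOn with
  | nil => simp [pmax]
  | append_singleton l y ih =>
    rw [List.foldl_append, List.foldl_cons, List.foldl_nil, ih]
    cases hp : pmax l with
    | none =>
      have hl : l = [] := by cases l with | nil => rfl | cons a t => simp [pmax] at hp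
      subst hl
      simp [twoMaxStep, pmax]
    | some m =>
      have hle := pmax_le hp
      by_cases hmy : m < y
      · -- new overall max
        have hfy : l.filter (fun x => decide (x < y)) = l := by
          apply List.filter_eq_self.mpr
          intro x hx
          exact decide_eq_true (lt_of_le_of_lt (hle x hx) hmy)
        simp only [twoMaxStep, hmy, decide_true, if_true]
        rw [pmax_append_single, hp]
        simp only [max_eq_right (le_of_lt hmy)]
        rw [List.filter_append]
        simp [hfy, hp]
      · -- y ≤ m
        have hmax : max m y = m := max_eq_left (le_of_not_gt hmy)
        rw [pmax_append_single, hp]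
        simp only [hmax]
        rw [List.filter_append]
        by_cases hym : y < m
        · -- y strictly below the max: the filtered list gains y
          simp only [hym, decide_true, List.filter_cons, List.filter_nil]
          cases hs : pmax (l.filter (fun x => decide (x < m))) with
          | none =>
            have : l.filter (fun x => decide (x < m)) = [] := by
              cases hc : l.filter (fun x => decide (x < m)) with
              | nil => rfl
              | cons a t => rw [hc] at hs; simp [pmax] at hs
            simp [twoMaxStep, hmy, hym, this, pmax]
          | some s =>
            have hsle := pmax_le hs
            by_cases hsy : s < y
            · -- y becomes the new second max
              have : pmax (l.filter (fun x => decide (x < m)) ++ [y]) = some y := by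
                rw [pmax_append_single, hs]
                simp [max_eq_right (le_of_lt hsy)]
              simp_all [twoMaxStep]
            · -- y ≤ s: second max unchanged
              have : pmax (l.filter (fun x => decide (x < m)) ++ [y]) = some s := by
                rw [pmax_append_single, hs]
                simp [max_eq_left (le_of_not_gt hsy)]
              simp_all [twoMaxStep]
              rw [if_neg (by omega), if_neg (by omega)]
        · -- y = m (not above, not below): nothing changes
          have hym' : ¬ (y < m) := hym
          simp only [hym', decide_false, List.filter_cons, List.filter_nil]
          simp [twoMaxStep, hmy, hym']

-- A's appending output loop is a filter
theorem foldl_append_filter (l : List Int) (p : Int → Bool) :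
    l.foldl (fun res e => if p e then res ++ [e] else res) [] = l.filter p := by
  have key : ∀ (l : List Int) (acc : List Int),
      l.foldl (fun res e => if p e then res ++ [e] else res) acc = acc ++ l.filter p := by
    intro l
    induction l with
    | nil => simp
    | cons h t ih =>
      intro acc
      by_cases hp : p h <;> simp [hp, ih]
  simpa using key l []

-- ===== VERDICT (by name: the statement is the Claim_ definition above) =====
theorem two_max_solution_spec : Claim_equal_two_max_solution := by
  intro a _
  unfold Spec_two_max_solution two_max_solution two_max_solution_alt
  cases a with
  | nil => simp
  | cons h t =>
    rw [foldl_step_char, max?_eq_pmax, foldl_append_filter]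
    cases hp : pmax (h :: t) with
    | none => simp [pmax] at hp
    | some m =>
      simp only [reduceCtorEq, if_false]
      rw [max?_eq_pmax]
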